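-- pv_equiv track=rewrite | github.com/lee-jae-o/PythonStudy | study/study90.py | count_toys
-- ===== SOURCE A (Python) =====
-- def count_toys(children_ages, toys):
--     toy_counts = [0] * len(toys)
--
--     for child_age in children_ages:
--         for i, toy in enumerate(toys):
--             min_age, max_age = toy
--             if min_age <= child_age <= max_age:
--                 toy_counts[i] += 1
--
--     max_toys = max(toy_counts)
--     return max_toys
-- ===== SOURCE B (Python) =====
-- def count_toys(children_ages, toys):
--     ages = sorted(children_ages)
--
--     def _bisect_left(a, x):
--         lo, hi = 0, len(a)
--         while lo < hi:
--             mid = (lo + hi) // 2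
--             if a[mid] < x:
--                 lo = mid + 1
--             else:
--                 hi = mid
--         return lo
--
--     def _bisect_right(a, x):
--         lo, hi = 0, len(a)
--         while lo < hi:
--             mid = (lo + hi) // 2
--             if x < a[mid]:
--                 hi = mid
--             else:
--                 lo = mid + 1
--         return lo
--
--     return max(
--         max(0, _bisect_right(ages, hi) - _bisect_left(ages, lo))
--         for lo, hi in toys
--     )
-- ===== Notes on version B (the rewrite author's own statement) =====
-- stated objective: faster
-- what changed: Instead of testing every (child, toy) pair, B sorts the children once and counts each toy's eligible children with two binary searches (hand-written bisect_left/bisect_right).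
-- outside the precondition, e.g. on count_toys([1, 2], []): A raises ValueError, B raises ValueError
import Mathlib
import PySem

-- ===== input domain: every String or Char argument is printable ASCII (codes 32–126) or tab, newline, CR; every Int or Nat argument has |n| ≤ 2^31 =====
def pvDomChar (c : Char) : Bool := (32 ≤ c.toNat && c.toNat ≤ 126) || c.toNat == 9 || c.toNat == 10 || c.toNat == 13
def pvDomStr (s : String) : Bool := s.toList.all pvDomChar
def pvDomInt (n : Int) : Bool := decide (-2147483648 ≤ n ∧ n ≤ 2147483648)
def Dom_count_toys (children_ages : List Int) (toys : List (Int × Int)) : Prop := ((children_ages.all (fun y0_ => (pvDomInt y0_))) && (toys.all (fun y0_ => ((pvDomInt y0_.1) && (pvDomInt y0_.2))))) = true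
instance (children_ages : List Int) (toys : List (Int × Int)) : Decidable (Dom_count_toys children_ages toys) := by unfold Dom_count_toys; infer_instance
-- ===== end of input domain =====

-- B replaces A's per-child scan over all toys by one sort of the children plus two
-- binary searches per toy (objective: faster).

-- ===== PORT A =====
def count_toys (children_ages : List Int) (toys : List (Int × Int)) : Int :=
  let toy_counts : List Int := List.replicate toys.length 0
  let toy_counts := children_ages.foldl (fun counts child_age =>
    (PySem.List.enumerate toys 0).foldl (fun counts p =>
      if p.2.1 ≤ child_age ∧ child_age ≤ p.2.2 then
        PySem.List.pySetD counts p.1 (PySem.List.pyGetD counts p.1 0 + 1)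
      else counts) counts) toy_counts
  -- max(toy_counts); Python raises on an empty list, excluded by Pre_
  (PySem.List.max? toy_counts (fun y => y)).getD 0

-- ===== PORT B =====
-- Source B's hand-written _bisect_left/_bisect_right are verbatim CPython bisect loops,
-- ported as the corresponding PySem primitives bisectLeft/bisectRight.
def count_toys_alt (children_ages : List Int) (toys : List (Int × Int)) : Int :=
  let ages := PySem.List.sorted children_ages (fun x => x)
  -- max(...) over the generator; Python raises on empty toys, excluded by Pre_
  (PySem.List.max?
    (toys.map (fun t =>
      max 0 ((PySem.List.bisectRight ages t.2 : Int) - (PySem.List.bisectLeft ages t.1 : Int))))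
    (fun y => y)).getD 0

-- ===== PRECONDITION & SPEC =====
-- Pre_ excludes only toys = [], where both Pythons raise ValueError (max of an empty sequence).
def Pre_count_toys (children_ages : List Int) (toys : List (Int × Int)) : Prop := toys ≠ []
instance (children_ages : List Int) (toys : List (Int × Int)) : Decidable (Pre_count_toys children_ages toys) := by unfold Pre_count_toys; infer_instance
def pvWitness_count_toys : List Int × (List (Int × Int)) := ([3, 1], [(1, 5), (4, 9)])

def Spec_count_toys (children_ages : List Int) (toys : List (Int × Int)) (out : Int) : Prop := out = count_toys_alt children_ages toys
instance (children_ages : List Int) (toys : List (Int × Int)) (out : Int) : Decidable (Spec_count_toys children_ages toys out) := by unfold Spec_count_toys; infer_instance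

-- ===== CLAIM (what is proved, stated in full; the proofs are below) =====
def Claim_equal_count_toys : Prop := ∀ (children_ages : List Int) (toys : List (Int × Int)), Dom_count_toys children_ages toys → Pre_count_toys children_ages toys → Spec_count_toys children_ages toys (count_toys children_ages toys)

-- ===== LEMMAS AND PROOFS =====

-- the number of children whose age lies in [lo, hi], as an Int
def pvCnt (l : List Int) (lo hi : Int) : Int :=
  (l.countP (fun a => decide (lo ≤ a ∧ a ≤ hi)) : Nat)

lemma pv_set_mid (pre l : List Int) (x v : Int) :
    (pre ++ x :: l).set pre.length v = pre ++ v :: l := by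
  induction pre with
  | nil => simp
  | cons a t ih => simp [ih]

-- A's inner loop (over enumerate toys) bumps each slot whose toy admits the age
lemma pv_inner (age : Int) :
    ∀ (ts : List (Int × Int)) (pre : List Int) (f : Int × Int → Int),
    (PySem.List.enumerate ts (pre.length : Int)).foldl (fun counts p =>
      if p.2.1 ≤ age ∧ age ≤ p.2.2 then
        PySem.List.pySetD counts p.1 (PySem.List.pyGetD counts p.1 0 + 1)
      else counts) (pre ++ ts.map f)
    = pre ++ ts.map (fun t => f t + if t.1 ≤ age ∧ age ≤ t.2 then 1 else 0) := by
  intro ts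
  induction ts with
  | nil => intro pre f; simp [PySem.List.enumerate_nil]
  | cons t rest ih =>
    intro pre f
    rw [PySem.List.enumerate_cons]
    simp only [List.foldl_cons, List.map_cons]
    have hget : PySem.List.pyGetD (pre ++ f t :: rest.map f) (pre.length : Int) 0 = f t := by
      rw [PySem.List.pyGetD_natCast]
      simp [List.getD_eq_getElem?_getD]
    have hset : ∀ v : Int, PySem.List.pySetD (pre ++ f t :: rest.map f) (pre.length : Int) v
        = pre ++ v :: rest.map f := by
      intro v
      rw [PySem.List.pySetD_natCast]
      exact pv_set_mid _ _ _ _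
    have key : ∀ v : Int,
        (PySem.List.enumerate rest ((pre.length : Int) + 1)).foldl (fun counts p =>
          if p.2.1 ≤ age ∧ age ≤ p.2.2 then
            PySem.List.pySetD counts p.1 (PySem.List.pyGetD counts p.1 0 + 1)
          else counts) (pre ++ v :: rest.map f)
        = pre ++ v :: rest.map (fun t => f t + if t.1 ≤ age ∧ age ≤ t.2 then 1 else 0) := by
      intro v
      rw [show ((pre.length : Int) + 1) = (((pre ++ [v]).length : Nat) : Int) by simp,
          show pre ++ v :: rest.map f = (pre ++ [v]) ++ rest.map f by simp, ih (pre ++ [v]) f]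
      simp
    by_cases h : t.1 ≤ age ∧ age ≤ t.2
    · rw [if_pos h, hget, hset, key (f t + 1), if_pos h]
    · rw [if_neg h, key (f t), if_neg h, add_zero]

-- A's outer loop turns the slot list into the count-per-toy list
lemma pv_outer (toys : List (Int × Int)) :
    ∀ (l : List Int) (f : Int × Int → Int),
    l.foldl (fun counts child_age =>
      (PySem.List.enumerate toys 0).foldl (fun counts p =>
        if p.2.1 ≤ child_age ∧ child_age ≤ p.2.2 then
          PySem.List.pySetD counts p.1 (PySem.List.pyGetD counts p.1 0 + 1)
        else counts) counts) (toys.map f)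
    = toys.map (fun t => f t + pvCnt l t.1 t.2) := by
  intro l
  induction l with
  | nil =>
    intro f
    simp [pvCnt]
  | cons a rest ih =>
    intro f
    simp only [List.foldl_cons]
    have h0 : (PySem.List.enumerate toys (0 : Int)) = (PySem.List.enumerate toys (((([] : List Int)).length : Nat) : Int)) := by
      simp
    rw [h0, show toys.map f = ([] : List Int) ++ toys.map f from rfl, pv_inner a toys [] f,
        List.nil_append, ← h0, ih (fun t => f t + if t.1 ≤ a ∧ a ≤ t.2 then 1 else 0)]
    refine List.map_congr_left (fun t _ => ?_)
    unfold pvCnt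
    rw [List.countP_cons]
    by_cases h : t.1 ≤ a ∧ a ≤ t.2
    · simp [h]; ring
    · simp [h]

-- countP of a prefix-monotone predicate read off index bounds
lemma pv_countP_of_bounds (xs : List Int) (p : Int → Bool) :
    ∀ (n : Nat), n ≤ xs.length →
    (∀ (j : Nat) (hj : j < xs.length), p xs[j] = true ↔ j < n) →
    xs.countP p = n := by
  induction xs with
  | nil =>
    intro n hn _
    have : n = 0 := Nat.le_zero.mp hn
    simp [this]
  | cons x t ih =>
    intro n hn h
    match n with
    | 0 =>
      have hx : p x = false := by
        have := h 0 (by simp)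
        simpa using this
      have ht : t.countP p = 0 := by
        refine ih 0 (by simp) ?_
        intro j hj
        have := h (j+1) (by simpa using Nat.succ_lt_succ hj)
        simpa using this
      simp [hx, ht]
    | m + 1 =>
      have hx : p x = true := by
        have := h 0 (by simp)
        simpa using this
      have ht : t.countP p = m := by
        refine ih m (by simpa using hn) ?_
        intro j hj
        have := h (j+1) (by simpa using Nat.succ_lt_succ hj)
        simpa [Nat.succ_lt_succ_iff] using this
      simp [hx, ht]

-- max(0, count(≤ hi) − count(< lo)) is the in-range count, for any list
lemma pv_maxsub (l : List Int) (lo hi : Int) :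
    max 0 ((l.countP (fun a => decide (a ≤ hi)) : Int) - (l.countP (fun a => decide (a < lo)) : Int))
      = pvCnt l lo hi := by
  unfold pvCnt
  by_cases hlh : lo ≤ hi
  · have key : l.countP (fun a => decide (a ≤ hi))
        = l.countP (fun a => decide (lo ≤ a ∧ a ≤ hi)) + l.countP (fun a => decide (a < lo)) := by
      induction l with
      | nil => simp
      | cons a t iht =>
        simp only [List.countP_cons, iht, decide_eq_true_eq]
        split_ifs <;> omega
    rw [key]
    push_cast
    omega
  · have h1 : l.countP (fun a => decide (lo ≤ a ∧ a ≤ hi)) = 0 := by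
      rw [List.countP_eq_zero]
      intro a _
      simp; omega
    have h2 : l.countP (fun a => decide (a ≤ hi)) ≤ l.countP (fun a => decide (a < lo)) := by
      apply List.countP_mono_left
      intro a _ ha
      simp at ha ⊢; omega
    rw [h1]
    push_cast
    omega

-- two bisects on the sorted children compute the in-range count
lemma pv_bisect_cnt (children : List Int) (lo hi : Int) :
    max 0 ((PySem.List.bisectRight (PySem.List.sorted children (fun x => x)) hi : Int)
           - (PySem.List.bisectLeft (PySem.List.sorted children (fun x => x)) lo : Int)) = pvCnt children lo hi := by
  set s := PySem.List.sorted children (fun x => x) with hs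
  have hperm : s.Perm children := PySem.List.sorted_perm children (fun x => x) false
  have hpair : s.Pairwise (fun a b => a ≤ b) := PySem.List.sorted_pairwise children (fun x => x)
  obtain ⟨hL1, hL2, hL3⟩ := PySem.List.bisectLeft_spec s lo hpair
  obtain ⟨hR1, hR2, hR3⟩ := PySem.List.bisectRight_spec s hi hpair
  have hL : s.countP (fun a => decide (a < lo)) = PySem.List.bisectLeft s lo := by
    refine pv_countP_of_bounds s _ _ hL1 ?_
    intro j hj
    constructor
    · intro hp
      by_contra hnot
      have := hL3 j hj (Nat.le_of_not_lt hnot)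
      simp at hp; omega
    · intro hlt
      simpa using hL2 j hj hlt
  have hR : s.countP (fun a => decide (a ≤ hi)) = PySem.List.bisectRight s hi := by
    refine pv_countP_of_bounds s _ _ hR1 ?_
    intro j hj
    constructor
    · intro hp
      by_contra hnot
      have := hR3 j hj (Nat.le_of_not_lt hnot)
      simp at hp; omega
    · intro hlt
      simpa using hR2 j hj hlt
  rw [← hL, ← hR, pv_maxsub]
  unfold pvCnt
  rw [hperm.countP_eq]

-- ===== VERDICT (by name: the statement is the Claim_ definition above) =====
theorem count_toys_spec : Claim_equal_count_toys := by
  intro children toys _ _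
  have hA := pv_outer toys children (fun _ => (0 : Int))
  simp only [Spec_count_toys, count_toys, count_toys_alt]
  rw [show List.replicate toys.length (0 : Int) = toys.map (fun _ => (0 : Int)) by simp, hA]
  congr 2
  refine List.map_congr_left (fun t _ => ?_)
  rw [pv_bisect_cnt children t.1 t.2]
  simp
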